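-- pv_equiv track=rewrite | github.com/mariolciax/Thue_online_play_gra_kombinatoryczna | aplication.py | sprawdz_abelowo
-- ===== SOURCE A (Python) =====
-- def sprawdz_abelowo(slowo, alfabet):
--     """
--     Sprawdzanie repetycji abelowych juz w konkretnych podslowach.
--     :param list slowo: slowo do sprawdzenia pod wzgledem repetycji abelowych
--     :param list alfabet: alfabet
--     :return: liczba (0- brak repetycji abelowych, 1- slowo ma repetycje abelowa)
--     """
--     n = len(slowo)
--     p = n // 2
--     a = len(alfabet)
--     wystapienia_1 = [0 * i for i in range(0, a)]
--     wystapienia_2 = [0 * i for i in range(0, a)]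
--     for i in range(0, a):
--         for j in range(0, p):
--             if slowo[j] == alfabet[i]:
--                 wystapienia_1[i] = wystapienia_1[i] + 1
--         for k in range(p, n):
--             if slowo[k] == alfabet[i]:
--                 wystapienia_2[i] = wystapienia_2[i] + 1
--     for g in range(0, a):
--         if wystapienia_1[g] != wystapienia_2[g]:
--             return 0
--     return 1
-- ===== SOURCE B (Python) =====
-- def sprawdz_abelowo(slowo, alfabet):
--     p = len(slowo) // 2
--     first = sorted(c for c in slowo[:p] if c in alfabet)
--     second = sorted(c for c in slowo[p:] if c in alfabet)
--     return 1 if first == second else 0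
-- ===== Notes on version B (the rewrite author's own statement) =====
-- stated objective: faster
-- what changed: Replaces the per-alphabet-symbol double histogram loops over the word with a sort-and-compare of the two halves filtered to alphabet members.
import Mathlib
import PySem

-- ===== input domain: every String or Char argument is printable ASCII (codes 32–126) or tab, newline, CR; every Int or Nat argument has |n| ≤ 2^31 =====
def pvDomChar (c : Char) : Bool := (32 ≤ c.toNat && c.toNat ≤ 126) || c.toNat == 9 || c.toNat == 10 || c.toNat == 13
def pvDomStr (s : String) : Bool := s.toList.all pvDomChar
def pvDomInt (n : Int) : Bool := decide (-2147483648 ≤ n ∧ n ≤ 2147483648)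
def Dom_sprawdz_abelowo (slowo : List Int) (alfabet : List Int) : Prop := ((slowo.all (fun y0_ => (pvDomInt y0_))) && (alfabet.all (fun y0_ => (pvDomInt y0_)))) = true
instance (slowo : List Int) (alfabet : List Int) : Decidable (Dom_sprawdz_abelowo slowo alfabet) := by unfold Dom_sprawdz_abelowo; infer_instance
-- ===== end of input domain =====

-- B replaces A's per-alphabet-symbol histogram loops with sort-and-compare of the two
-- alphabet-filtered halves (objective: simpler).

-- ===== PORT A =====
def sprawdz_abelowo (slowo : List Int) (alfabet : List Int) : Int :=
  let n : Int := PySem.List.len slowo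
  let p : Int := PySem.Int.floordiv n 2
  let a : Int := PySem.List.len alfabet
  let wystapienia_1 : List Int := (PySem.List.pyRange 0 a 1).map (fun i => 0 * i)
  let wystapienia_2 : List Int := (PySem.List.pyRange 0 a 1).map (fun i => 0 * i)
  let ws : List Int × List Int := (PySem.List.pyRange 0 a 1).foldl
    (fun ws i =>
      ((PySem.List.pyRange 0 p 1).foldl
        (fun w1 j => if PySem.List.pyGetD slowo j 0 == PySem.List.pyGetD alfabet i 0
                     then PySem.List.pySetD w1 i (PySem.List.pyGetD w1 i 0 + 1) else w1) ws.1,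
       (PySem.List.pyRange p n 1).foldl
        (fun w2 k => if PySem.List.pyGetD slowo k 0 == PySem.List.pyGetD alfabet i 0
                     then PySem.List.pySetD w2 i (PySem.List.pyGetD w2 i 0 + 1) else w2) ws.2))
    (wystapienia_1, wystapienia_2)
  if (PySem.List.pyRange 0 a 1).all
       (fun g => PySem.List.pyGetD ws.1 g 0 == PySem.List.pyGetD ws.2 g 0) then 1 else 0

-- ===== PORT B =====
def sprawdz_abelowo_alt (slowo : List Int) (alfabet : List Int) : Int :=
  let p : Int := PySem.Int.floordiv (PySem.List.len slowo) 2
  let first : List Int :=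
    PySem.List.sorted ((PySem.List.slice slowo none (some p)).filter (fun c => alfabet.contains c)) (fun x => x) false
  let second : List Int :=
    PySem.List.sorted ((PySem.List.slice slowo (some p) none).filter (fun c => alfabet.contains c)) (fun x => x) false
  if first = second then 1 else 0

-- ===== PRECONDITION & SPEC =====
def Spec_sprawdz_abelowo (slowo : List Int) (alfabet : List Int) (out : Int) : Prop := out = sprawdz_abelowo_alt slowo alfabet
instance (slowo : List Int) (alfabet : List Int) (out : Int) : Decidable (Spec_sprawdz_abelowo slowo alfabet out) := by unfold Spec_sprawdz_abelowo; infer_instance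

-- ===== CLAIM (what is proved, stated in full; the proofs are below) =====
def Claim_equal_sprawdz_abelowo : Prop := ∀ (slowo : List Int) (alfabet : List Int), Dom_sprawdz_abelowo slowo alfabet → Spec_sprawdz_abelowo slowo alfabet (sprawdz_abelowo slowo alfabet)

-- ===== LEMMAS AND PROOFS =====

-- the inner occurrence-counting loop writes only index i: it equals one write of the scalar count
lemma pv_inner (P : Int → Bool) (r : List Int) :
    ∀ (w : List Int) (i : Int), 0 ≤ i → i < (w.length : Int) →
    r.foldl (fun w' j => if P j then PySem.List.pySetD w' i (PySem.List.pyGetD w' i 0 + 1) else w') w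
      = PySem.List.pySetD w i (PySem.List.pyGetD w i 0 + (r.countP P : Int)) := by
  induction r with
  | nil =>
      intro w i h0 h1
      simp [PySem.List.pySetD_of_nonneg _ _ h0, PySem.List.pyGetD_eq_getElem _ _ h0 h1]
  | cons j r ih =>
      intro w i h0 h1
      by_cases hP : P j
      · have hlen : ((PySem.List.pySetD w i (PySem.List.pyGetD w i 0 + 1)).length : Int) = (w.length : Int) := by
          simp [PySem.List.pySetD_of_nonneg _ _ h0]
        simp only [List.foldl_cons, hP, if_pos]
        rw [ih _ i h0 (by rw [hlen]; exact h1)]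
        rw [PySem.List.pySetD_of_nonneg _ _ h0, PySem.List.pySetD_of_nonneg _ _ h0,
            PySem.List.pySetD_of_nonneg _ _ h0, PySem.List.pyGetD_eq_getElem _ _ h0 h1]
        have hi : i.toNat < w.length := by omega
        rw [PySem.List.pyGetD_eq_getElem (w.set i.toNat (w[i.toNat] + 1)) 0 h0 (by simpa using h1)]
        simp only [List.getElem_set_self]
        rw [List.set_set, List.countP_cons]
        congr 1
        simp [hP]
        ring
      · simp only [List.foldl_cons, hP, if_neg, Bool.false_eq_true, not_false_iff]
        rw [ih _ i h0 h1]
        simp [hP]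

-- the outer loop: position g of either histogram list after processing range [m, a)
lemma pv_pairfold (slowo alfabet : List Int) (p nn : Int) (a : Int) :
    ∀ (k : Nat) (m : Int) (w1 w2 : List Int), 0 ≤ m → (a - m).toNat = k →
    a ≤ (w1.length : Int) → a ≤ (w2.length : Int) →
    (((PySem.List.pyRange m a 1).foldl
      (fun ws i =>
        ((PySem.List.pyRange 0 p 1).foldl
          (fun w1 j => if PySem.List.pyGetD slowo j 0 == PySem.List.pyGetD alfabet i 0
                       then PySem.List.pySetD w1 i (PySem.List.pyGetD w1 i 0 + 1) else w1) ws.1,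
         (PySem.List.pyRange p nn 1).foldl
          (fun w2 k => if PySem.List.pyGetD slowo k 0 == PySem.List.pyGetD alfabet i 0
                       then PySem.List.pySetD w2 i (PySem.List.pyGetD w2 i 0 + 1) else w2) ws.2))
      (w1, w2)).1.length = w1.length) ∧
    (((PySem.List.pyRange m a 1).foldl
      (fun ws i =>
        ((PySem.List.pyRange 0 p 1).foldl
          (fun w1 j => if PySem.List.pyGetD slowo j 0 == PySem.List.pyGetD alfabet i 0
                       then PySem.List.pySetD w1 i (PySem.List.pyGetD w1 i 0 + 1) else w1) ws.1,
         (PySem.List.pyRange p nn 1).foldl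
          (fun w2 k => if PySem.List.pyGetD slowo k 0 == PySem.List.pyGetD alfabet i 0
                       then PySem.List.pySetD w2 i (PySem.List.pyGetD w2 i 0 + 1) else w2) ws.2))
      (w1, w2)).2.length = w2.length) ∧
    (∀ g : Int, 0 ≤ g → g < a →
      PySem.List.pyGetD ((PySem.List.pyRange m a 1).foldl
        (fun ws i =>
          ((PySem.List.pyRange 0 p 1).foldl
            (fun w1 j => if PySem.List.pyGetD slowo j 0 == PySem.List.pyGetD alfabet i 0
                         then PySem.List.pySetD w1 i (PySem.List.pyGetD w1 i 0 + 1) else w1) ws.1,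
           (PySem.List.pyRange p nn 1).foldl
            (fun w2 k => if PySem.List.pyGetD slowo k 0 == PySem.List.pyGetD alfabet i 0
                         then PySem.List.pySetD w2 i (PySem.List.pyGetD w2 i 0 + 1) else w2) ws.2))
        (w1, w2)).1 g 0
        = (if m ≤ g then PySem.List.pyGetD w1 g 0
             + (((PySem.List.pyRange 0 p 1).countP
                  (fun j => PySem.List.pyGetD slowo j 0 == PySem.List.pyGetD alfabet g 0) : Nat) : Int)
           else PySem.List.pyGetD w1 g 0) ∧
      PySem.List.pyGetD ((PySem.List.pyRange m a 1).foldl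
        (fun ws i =>
          ((PySem.List.pyRange 0 p 1).foldl
            (fun w1 j => if PySem.List.pyGetD slowo j 0 == PySem.List.pyGetD alfabet i 0
                         then PySem.List.pySetD w1 i (PySem.List.pyGetD w1 i 0 + 1) else w1) ws.1,
           (PySem.List.pyRange p nn 1).foldl
            (fun w2 k => if PySem.List.pyGetD slowo k 0 == PySem.List.pyGetD alfabet i 0
                         then PySem.List.pySetD w2 i (PySem.List.pyGetD w2 i 0 + 1) else w2) ws.2))
        (w1, w2)).2 g 0
        = (if m ≤ g then PySem.List.pyGetD w2 g 0
             + (((PySem.List.pyRange p nn 1).countP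
                  (fun j => PySem.List.pyGetD slowo j 0 == PySem.List.pyGetD alfabet g 0) : Nat) : Int)
           else PySem.List.pyGetD w2 g 0)) := by
  intro k
  induction k with
  | zero =>
      intro m w1 w2 hm hk hl1 hl2
      have ham : a ≤ m := by omega
      simp only [PySem.List.pyRange_one_eq_nil ham, List.foldl_nil]
      refine ⟨trivial, trivial, ?_⟩
      intro g hg0 hga
      have hng : ¬ m ≤ g := by omega
      simp [hng]
  | succ k ih =>
      intro m w1 w2 hm hk hl1 hl2
      have hma : m < a := by omega
      simp only [PySem.List.pyRange_one_cons hma, List.foldl_cons]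
      rw [pv_inner (fun j => PySem.List.pyGetD slowo j 0 == PySem.List.pyGetD alfabet m 0)
            (PySem.List.pyRange 0 p 1) w1 m hm (by omega),
          pv_inner (fun j => PySem.List.pyGetD slowo j 0 == PySem.List.pyGetD alfabet m 0)
            (PySem.List.pyRange p nn 1) w2 m hm (by omega)]
      have hlen1 : (PySem.List.pySetD w1 m (PySem.List.pyGetD w1 m 0 +
          ((PySem.List.pyRange 0 p 1).countP
            (fun j => PySem.List.pyGetD slowo j 0 == PySem.List.pyGetD alfabet m 0) : Int))).length
          = w1.length := by
        rw [PySem.List.pySetD_of_nonneg _ _ hm]; simp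
      have hlen2 : (PySem.List.pySetD w2 m (PySem.List.pyGetD w2 m 0 +
          ((PySem.List.pyRange p nn 1).countP
            (fun j => PySem.List.pyGetD slowo j 0 == PySem.List.pyGetD alfabet m 0) : Int))).length
          = w2.length := by
        rw [PySem.List.pySetD_of_nonneg _ _ hm]; simp
      obtain ⟨L1, L2, H⟩ := ih (m + 1) _ _ (by omega) (by omega)
        (by rw [hlen1]; exact hl1) (by rw [hlen2]; exact hl2)
      refine ⟨by rw [L1, hlen1], by rw [L2, hlen2], ?_⟩
      intro g hg0 hga
      obtain ⟨G1, G2⟩ := H g hg0 hga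
      have key : ∀ (w : List Int) (v : Int), a ≤ (w.length : Int) →
          PySem.List.pyGetD (PySem.List.pySetD w m v) g 0
            = if g = m then v else PySem.List.pyGetD w g 0 := by
        intro w v hw
        have hgw : g < (w.length : Int) := by omega
        have hmw : m.toNat < w.length := by omega
        rw [PySem.List.pySetD_of_nonneg _ _ hm,
            PySem.List.pyGetD_eq_getElem _ _ hg0 (by simpa using hgw),
            List.getElem_set]
        by_cases hgm : g = m
        · subst hgm; simp
        · have hne : ¬ m.toNat = g.toNat := by omega
          rw [if_neg hne, if_neg hgm, PySem.List.pyGetD_eq_getElem _ _ hg0 hgw]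
      constructor
      · rw [G1, key w1 _ hl1]
        by_cases hgm : g = m
        · simp [hgm]
        · by_cases hge : m + 1 ≤ g
          · have : m ≤ g := by omega
            simp [hge, hgm, this]
          · have : ¬ m ≤ g := by omega
            simp [hge, hgm, this]
      · rw [G2, key w2 _ hl2]
        by_cases hgm : g = m
        · simp [hgm]
        · by_cases hge : m + 1 ≤ g
          · have : m ≤ g := by omega
            simp [hge, hgm, this]
          · have : ¬ m ≤ g := by omega
            simp [hge, hgm, this]

lemma pv_cnt_take (slowo : List Int) (x : Int) (t : Nat) (ht : t ≤ slowo.length) :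
    ((PySem.List.pyRange 0 ((t : Nat) : Int) 1).countP
      (fun j => PySem.List.pyGetD slowo j 0 == x) : Nat) = (slowo.take t).count x := by
  have hlen : ((slowo.take t).length : Int) = ((t : Nat) : Int) := by
    simp [List.length_take, Nat.min_eq_left ht]
  have hcongr : (PySem.List.pyRange 0 ((t : Nat) : Int) 1).countP
      (fun j => PySem.List.pyGetD slowo j 0 == x)
      = (PySem.List.pyRange 0 ((t : Nat) : Int) 1).countP
      (fun j => PySem.List.pyGetD (slowo.take t) j 0 == x) := by
    apply List.countP_congr
    intro j hj
    rw [PySem.List.mem_pyRange_one] at hj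
    have hjt : j < ((slowo.take t).length : Int) := by omega
    rw [PySem.List.pyGetD_eq_getElem _ _ hj.1 (by omega),
        PySem.List.pyGetD_eq_getElem _ _ hj.1 hjt, List.getElem_take]
  rw [hcongr, ← hlen]
  have hmap := PySem.List.map_pyGetD_pyRange_zero (slowo.take t) (0 : Int)
  simp only [PySem.List.len_eq] at hmap
  conv_rhs => rw [← hmap]
  simp [List.count, List.countP_map]
  rfl

lemma pv_cnt_drop (slowo : List Int) (x : Int) (t : Nat) :
    ((PySem.List.pyRange ((t : Nat) : Int) ((slowo.length : Nat) : Int) 1).countP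
      (fun j => PySem.List.pyGetD slowo j 0 == x) : Nat) = (slowo.drop t).count x := by
  have hmap := PySem.List.map_pyGetD_pyRange slowo (0 : Int) (a := ((t : Nat) : Int)) (by positivity)
  simp only [PySem.List.len_eq, Int.toNat_natCast] at hmap
  conv_rhs => rw [← hmap]
  simp [List.count, List.countP_map]
  rfl

lemma pv_cond (slowo alfabet : List Int) (t : Nat) :
    ((∀ x ∈ alfabet, (slowo.take t).count x = (slowo.drop t).count x) ↔
      PySem.List.sorted ((slowo.take t).filter (fun c => alfabet.contains c)) (fun x => x) false
        = PySem.List.sorted ((slowo.drop t).filter (fun c => alfabet.contains c)) (fun x => x) false) := by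
  rw [PySem.List.sorted_id_eq_sorted_id_iff_perm, List.perm_iff_count]
  constructor
  · intro h x
    by_cases hx : x ∈ alfabet
    · rw [List.count_filter (by simpa using hx), List.count_filter (by simpa using hx), h x hx]
    · rw [List.count_eq_zero.mpr, List.count_eq_zero.mpr] <;>
        · simp only [List.mem_filter]
          exact fun hc => absurd (by simpa using hc.2) hx
  · intro h x hx
    have hx' := h x
    rwa [List.count_filter (by simpa using hx), List.count_filter (by simpa using hx)] at hx'

lemma pv_B_char (slowo alfabet : List Int) :
    sprawdz_abelowo_alt slowo alfabet =
      if ∀ x ∈ alfabet, (slowo.take (slowo.length / 2)).count x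
          = (slowo.drop (slowo.length / 2)).count x then 1 else 0 := by
  have hp : PySem.Int.floordiv ((slowo.length : Nat) : Int) 2 = ((slowo.length / 2 : Nat) : Int) := by
    exact_mod_cast PySem.Int.floordiv_natCast slowo.length 2
  simp only [sprawdz_abelowo_alt, PySem.List.len_eq, hp,
    PySem.List.slice_to_natCast, PySem.List.slice_from_natCast]
  exact if_congr (pv_cond slowo alfabet (slowo.length / 2)).symm rfl rfl

lemma pv_A_char (slowo alfabet : List Int) :
    sprawdz_abelowo slowo alfabet =
      if ∀ x ∈ alfabet, (slowo.take (slowo.length / 2)).count x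
          = (slowo.drop (slowo.length / 2)).count x then 1 else 0 := by
  have hp : PySem.Int.floordiv ((slowo.length : Nat) : Int) 2 = ((slowo.length / 2 : Nat) : Int) := by
    exact_mod_cast PySem.Int.floordiv_natCast slowo.length 2
  have ht : slowo.length / 2 ≤ slowo.length := Nat.div_le_self _ _
  simp only [sprawdz_abelowo, PySem.List.len_eq, hp]
  obtain ⟨L1, L2, H⟩ := pv_pairfold slowo alfabet ((slowo.length / 2 : Nat) : Int)
      ((slowo.length : Nat) : Int) ((alfabet.length : Nat) : Int) alfabet.length 0
      ((PySem.List.pyRange 0 ((alfabet.length : Nat) : Int) 1).map (fun i => 0 * i))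
      ((PySem.List.pyRange 0 ((alfabet.length : Nat) : Int) 1).map (fun i => 0 * i))
      le_rfl (by simp)
      (by simp [PySem.List.length_pyRange_one])
      (by simp [PySem.List.length_pyRange_one])
  refine if_congr ?_ rfl rfl
  rw [List.all_eq_true]
  have hzero : ∀ g : Int, 0 ≤ g → g < ((alfabet.length : Nat) : Int) →
      PySem.List.pyGetD ((PySem.List.pyRange 0 ((alfabet.length : Nat) : Int) 1).map (fun i => 0 * i)) g 0 = 0 := by
    intro g h0 h1
    rw [PySem.List.pyGetD_map_pyRange_of_nonneg _ _ _ _ h0 h1]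
    ring
  constructor
  · intro hall x hx
    obtain ⟨ki, hkl, hke⟩ := List.mem_iff_getElem.mp hx
    have h0 : (0 : Int) ≤ (ki : Int) := by positivity
    have h1 : ((ki : Int)) < ((alfabet.length : Nat) : Int) := by exact_mod_cast hkl
    have hg := hall ((ki : Nat) : Int) (by rw [PySem.List.mem_pyRange_one]; exact ⟨h0, h1⟩)
    obtain ⟨G1, G2⟩ := H ((ki : Nat) : Int) h0 h1
    rw [G1, G2, hzero _ h0 h1] at hg
    rw [if_pos h0, if_pos h0, PySem.List.pyGetD_ofNat alfabet ki 0 hkl, hke] at hg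
    simp only [zero_add, beq_iff_eq] at hg
    rw [pv_cnt_take slowo x _ ht, pv_cnt_drop slowo x _] at hg
    exact_mod_cast hg
  · intro h g hg
    rw [PySem.List.mem_pyRange_one] at hg
    obtain ⟨G1, G2⟩ := H g hg.1 hg.2
    rw [G1, G2, hzero _ hg.1 hg.2]
    rw [if_pos hg.1, if_pos hg.1]
    have hmem : PySem.List.pyGetD alfabet g 0 ∈ alfabet := by
      rw [PySem.List.pyGetD_eq_getElem _ _ hg.1 hg.2]
      exact List.getElem_mem _
    have hcnt := h _ hmem
    simp only [zero_add, beq_iff_eq]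
    rw [pv_cnt_take slowo _ _ ht, pv_cnt_drop]
    exact_mod_cast hcnt

-- ===== VERDICT (by name: the statement is the Claim_ definition above) =====
theorem sprawdz_abelowo_spec : Claim_equal_sprawdz_abelowo := by
  intro slowo alfabet _
  unfold Spec_sprawdz_abelowo
  rw [pv_A_char, pv_B_char]
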